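-- pv_equiv track=rewrite | github.com/melmanss/Hillel_Python_Project | H_W/rows/hashtag.py | create_hashtag
-- ===== SOURCE A (Python) =====
-- import string
--
-- def create_hashtag(text: str) -> str:
--     """
--     Перетворює вхідний рядок на хештег у форматі CamelCase.
--
--     Args:
--         text (str): Вхідний рядок для обробки.
--
--     Returns:
--         str: Сформований хештег (макс. 140 символів).
--     """
--     clean_text = "".join(
--         char for char in text if char not in string.punctuation
--     )
--
--     words = clean_text.split()
--     capitalized_words = [word.capitalize() for word in words]
--
--     hashtag = "#" + "".join(capitalized_words)
--
--     if len(hashtag) > 140: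
--         hashtag = hashtag[:140]
--
--     return hashtag
-- ===== SOURCE B (Python) =====
-- import string
--
-- def create_hashtag(text: str) -> str:
--     # Single pass: skip punctuation, whitespace marks a word start, case chars on the fly.
--     buf = ["#"]
--     start = True
--     for ch in text:
--         if ch in string.punctuation:
--             continue
--         if ch.isspace():
--             start = True
--         else:
--             buf.append(ch.upper() if start else ch.lower())
--             start = False
--     return "".join(buf)[:140]
-- ===== Notes on version B (the rewrite author's own statement) =====
-- stated objective: alternative
-- what changed: Replaces the filter->split()->capitalize->join->conditional-truncate pipeline over intermediate strings by a single fused pass over the characters that keeps a buffer and a word-start flag (skip punctuation, whitespace arms the flag, otherwise emit the char uppercased at a word start and lowercased elsewhere), then truncates to 140.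
import Mathlib
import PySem

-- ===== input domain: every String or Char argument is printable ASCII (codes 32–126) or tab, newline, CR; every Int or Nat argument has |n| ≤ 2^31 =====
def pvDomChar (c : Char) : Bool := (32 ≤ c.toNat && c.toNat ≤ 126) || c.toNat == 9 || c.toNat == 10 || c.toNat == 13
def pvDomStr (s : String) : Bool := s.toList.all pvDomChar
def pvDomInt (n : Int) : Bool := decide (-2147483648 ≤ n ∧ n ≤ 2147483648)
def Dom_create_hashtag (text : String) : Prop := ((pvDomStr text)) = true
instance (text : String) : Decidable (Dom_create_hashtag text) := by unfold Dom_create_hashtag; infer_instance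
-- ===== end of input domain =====

-- B fuses A's filter→split→capitalize→join pipeline into one pass with a word-start flag (objective: alternative decomposition, same cost).

-- ===== PORT A =====
-- string.punctuation
def pyPunctuation : List Char := "!\"#$%&'()*+,-./:;<=>?@[\\]^_`{|}~".toList

-- word.capitalize(): first char to upper (exact for ASCII, where titlecase = uppercase), rest to lower
def capWord (w : List Char) : List Char :=
  match w with
  | [] => []
  | c :: r => PySem.Chars.upperChar c :: r.map PySem.Chars.lowerChar

def create_hashtag (text : String) : String :=
  -- clean_text = "".join(char for char in text if char not in string.punctuation)
  let clean_text := text.toList.filter (fun c => !(pyPunctuation.contains c))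
  -- words = clean_text.split()
  let words := PySem.Chars.split₀ clean_text
  -- capitalized_words = [word.capitalize() for word in words]
  let capitalized_words := words.map capWord
  -- hashtag = "#" + "".join(capitalized_words)
  let hashtag := '#' :: capitalized_words.flatten
  -- if len(hashtag) > 140: hashtag = hashtag[:140]   ([:140] on a list of chars = take 140)
  String.ofList (if hashtag.length > 140 then hashtag.take 140 else hashtag)

-- ===== PORT B =====
-- the loop body of B: skip punctuation; whitespace re-arms the word-start flag; otherwise emit cased char
def bStep (s : List Char × Bool) (ch : Char) : List Char × Bool :=
  if pyPunctuation.contains ch then s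
  else if PySem.Chars.isspace ch then (s.1, true)
  else (s.1 ++ [if s.2 then PySem.Chars.upperChar ch else PySem.Chars.lowerChar ch], false)

def create_hashtag_alt (text : String) : String :=
  let r := text.toList.foldl bStep (['#'], true)
  -- "".join(buf)[:140]
  String.ofList (r.1.take 140)

-- ===== PRECONDITION & SPEC =====
def Spec_create_hashtag (text : String) (out : String) : Prop := out = create_hashtag_alt text
instance (text : String) (out : String) : Decidable (Spec_create_hashtag text out) := by unfold Spec_create_hashtag; infer_instance

-- ===== CLAIM (what is proved, stated in full; the proofs are below) =====
def Claim_equal_create_hashtag : Prop := ∀ (text : String), Dom_create_hashtag text → Spec_create_hashtag text (create_hashtag text)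

-- ===== LEMMAS AND PROOFS =====

-- the punctuation-free loop body
def wStep (s : List Char × Bool) (ch : Char) : List Char × Bool :=
  if PySem.Chars.isspace ch then (s.1, true)
  else (s.1 ++ [if s.2 then PySem.Chars.upperChar ch else PySem.Chars.lowerChar ch], false)

def notSpace (c : Char) : Bool := !(PySem.Chars.isspace c)

lemma foldl_bStep_eq (l : List Char) (s : List Char × Bool) :
    l.foldl bStep s = (l.filter (fun c => !(pyPunctuation.contains c))).foldl wStep s := by
  induction l generalizing s with
  | nil => rfl
  | cons c t ih =>
      by_cases h : c ∈ pyPunctuation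
      · simp [List.foldl, bStep, h, ih]
      · simp [List.foldl, bStep, wStep, h, ih]

set_option maxRecDepth 4096 in
lemma split_go_acc (l : List Char) : ∀ (cur : List Char) (acc : List (List Char)),
    PySem.Chars.split₀.go l cur acc = acc.reverse ++ PySem.Chars.split₀.go l cur [] := by
  induction l with
  | nil =>
      intro cur acc
      by_cases h : cur.isEmpty
      · simp [PySem.Chars.split₀.go, h]
      · rw [PySem.Chars.split₀.go.eq_def, PySem.Chars.split₀.go.eq_def]
        simp [h]
  | cons c t ih =>
      intro cur acc
      by_cases hs : PySem.Chars.isspace c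
      · by_cases h : cur.isEmpty
        · rw [PySem.Chars.split₀.go.eq_def, PySem.Chars.split₀.go.eq_def]
          simp only [hs, h, if_true]
          exact ih [] acc
        · rw [PySem.Chars.split₀.go.eq_def, PySem.Chars.split₀.go.eq_def]
          simp only [hs, h, if_true, if_false, Bool.false_eq_true]
          rw [ih [] (cur.reverse :: acc), ih [] [cur.reverse]]
          simp
      · rw [PySem.Chars.split₀.go.eq_def, PySem.Chars.split₀.go.eq_def]
        simp only [hs, Bool.false_eq_true, if_false]
        exact ih _ _

lemma split_go_cur (l : List Char) : ∀ (c : Char) (cs : List Char),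
    PySem.Chars.split₀.go l (c :: cs) [] =
      ((c :: cs).reverse ++ l.takeWhile notSpace) ::
        PySem.Chars.split₀ (l.dropWhile notSpace) := by
  induction l with
  | nil => intro c cs; simp [PySem.Chars.split₀.go, PySem.Chars.split₀]
  | cons a t ih =>
      intro c cs
      by_cases hs : PySem.Chars.isspace a
      · simp only [PySem.Chars.split₀.go, hs, if_true, List.isEmpty_cons, Bool.false_eq_true, if_false]
        rw [split_go_acc]
        simp only [List.takeWhile, List.dropWhile, notSpace, hs, Bool.not_true]
        simp [PySem.Chars.split₀, PySem.Chars.split₀.go, hs]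
      · simp only [PySem.Chars.split₀.go, hs, Bool.false_eq_true, if_false]
        rw [ih a (c :: cs)]
        simp [List.takeWhile, List.dropWhile, notSpace, hs]

lemma split₀_cons_space {c : Char} (l : List Char) (h : PySem.Chars.isspace c = true) :
    PySem.Chars.split₀ (c :: l) = PySem.Chars.split₀ l := by
  simp [PySem.Chars.split₀, PySem.Chars.split₀.go, h]

lemma split₀_cons_char {c : Char} (l : List Char) (h : ¬ PySem.Chars.isspace c = true) :
    PySem.Chars.split₀ (c :: l) =
      (c :: l.takeWhile notSpace) :: PySem.Chars.split₀ (l.dropWhile notSpace) := by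
  simp only [PySem.Chars.split₀, PySem.Chars.split₀.go, h, Bool.false_eq_true, if_false]
  rw [split_go_cur]
  simp [PySem.Chars.split₀]

-- joint loop invariant: with the flag armed the buffer tracks the capitalized-words pipeline;
-- with it disarmed the current word's remaining chars are lowercased
lemma fold_wStep (l : List Char) : ∀ (buf : List Char),
    (l.foldl wStep (buf, true)).1 = buf ++ ((PySem.Chars.split₀ l).map capWord).flatten
    ∧ (l.foldl wStep (buf, false)).1 =
        buf ++ (l.takeWhile notSpace).map PySem.Chars.lowerChar
            ++ ((PySem.Chars.split₀ (l.dropWhile notSpace)).map capWord).flatten := by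
  induction l with
  | nil => intro buf; simp [PySem.Chars.split₀, PySem.Chars.split₀.go]
  | cons c t ih =>
      intro buf
      by_cases hs : PySem.Chars.isspace c
      · constructor
        · simp only [List.foldl, wStep, hs, if_true]
          rw [(ih buf).1, split₀_cons_space t hs]
        · simp only [List.foldl, wStep, hs, if_true]
          rw [(ih buf).1]
          simp [List.takeWhile, List.dropWhile, notSpace, hs, split₀_cons_space t hs]
      · constructor
        · simp only [List.foldl, wStep, hs, Bool.false_eq_true, if_false, if_true]
          rw [(ih (buf ++ [PySem.Chars.upperChar c])).2, split₀_cons_char t hs]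
          simp [capWord]
        · simp only [List.foldl, wStep, hs, Bool.false_eq_true, if_false]
          rw [(ih (buf ++ [PySem.Chars.lowerChar c])).2]
          simp [List.takeWhile, List.dropWhile, notSpace, hs]

-- ===== VERDICT (by name: the statement is the Claim_ definition above) =====
theorem create_hashtag_spec : Claim_equal_create_hashtag := by
  intro text _
  show create_hashtag text = create_hashtag_alt text
  unfold create_hashtag create_hashtag_alt
  dsimp only
  rw [foldl_bStep_eq]
  rw [(fold_wStep _ ['#']).1]
  simp only [List.singleton_append]
  generalize ('#' :: (List.map capWord (PySem.Chars.split₀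
      (List.filter (fun c => !(pyPunctuation.contains c)) text.toList))).flatten) = h
  by_cases hl : h.length > 140
  · rw [if_pos hl]
  · rw [if_neg hl, List.take_of_length_le (by omega)]
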